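-- pv_equiv track=rewrite | github.com/salwam2459/DNA-Pattern-Matching-Bioinformatics-Tool | main.py | longest_run_count
-- ===== SOURCE A (Python) =====
-- def longest_run_count(sequence, STR):
--     str_length = len(STR)
--     i = 0
--     max_run = 0                         #tracks max number of consectutive repeats
--     running_now = 0                     #tracks current run
--     while i < len(sequence):
--         if sequence[i:i + str_length] == STR:
--             running_now += 1                        # If a match is found, increment the current run count
--             i += str_length                         #Move to the next set of letters
--         else:
--             max_run = max(max_run, running_now)     # Update the maximum run if the current run is larger.
--             running_now = 0                         # Reset the current run count
--             i += 1                                  # Move the index forward by one position in the DNA sequence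
--     return max(max_run, running_now)
-- ===== SOURCE B (Python) =====
-- def longest_run_count(sequence, STR):
--     # Event-driven scan: jump between occurrences with str.find instead of
--     # testing a slice at every index.
--     if not STR:
--         return 0
--     best = 0
--     run = 0
--     i = 0
--     while True:
--         j = sequence.find(STR, i)
--         if j == -1:
--             return max(best, run)
--         if j > i:
--             best = max(best, run)
--             run = 1
--         else:
--             run += 1
--         i = j + len(STR)
-- ===== Notes on version B (the rewrite author's own statement) =====
-- stated objective: faster
-- what changed: Instead of testing a fresh slice at every index, B jumps directly from occurrence to occurrence with str.find (C-level substring search) and updates the run counters per occurrence, so the per-index Python-level slice comparisons disappear.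
-- outside the precondition, e.g. on longest_run_count('abc', ''): A does not finish within the time limit, B returns 0
import Mathlib
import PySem

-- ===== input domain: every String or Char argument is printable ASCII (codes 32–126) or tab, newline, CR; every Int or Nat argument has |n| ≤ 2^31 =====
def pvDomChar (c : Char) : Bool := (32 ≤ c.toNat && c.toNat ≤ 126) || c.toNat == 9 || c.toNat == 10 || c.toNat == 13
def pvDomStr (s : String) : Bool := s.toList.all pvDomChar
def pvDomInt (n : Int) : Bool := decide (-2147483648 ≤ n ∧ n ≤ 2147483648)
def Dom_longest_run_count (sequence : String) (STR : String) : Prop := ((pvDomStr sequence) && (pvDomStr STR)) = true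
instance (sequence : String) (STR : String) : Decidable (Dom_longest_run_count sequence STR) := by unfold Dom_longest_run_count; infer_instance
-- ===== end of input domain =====

-- B replaces A's per-index slice comparison with jumps between occurrences found by
-- str.find; objective: faster (a timing run measured it) by a constant-factor mechanism.
-- A's while-loop never terminates for STR = "" on a nonempty sequence; Pre_ excludes exactly that.

-- ===== PORT A =====
-- A's while loop, ported as fuel recursion; fuel s.length + 1 is enough whenever STR ≠ ""
-- (i strictly increases each iteration); strings are ported through .toList,
-- sequence[i:i+str_length] is PySem.List.slice (exact Python slice semantics).
def pvLoopA (s t : List Char) (L : Nat) : Nat → Nat → Int → Int → Int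
  | 0, _, maxRun, runningNow => max maxRun runningNow
  | fuel + 1, i, maxRun, runningNow =>
    if i < s.length then
      if PySem.List.slice s (some (i : Int)) (some ((i : Int) + (L : Int))) = t then
        pvLoopA s t L fuel (i + L) maxRun (runningNow + 1)
      else
        pvLoopA s t L fuel (i + 1) (max maxRun runningNow) 0
    else max maxRun runningNow

def longest_run_count (sequence : String) (STR : String) : Int :=
  pvLoopA sequence.toList STR.toList STR.toList.length (sequence.toList.length + 1) 0 0 0

-- ===== PORT B =====
-- B's while loop: sequence.find(STR, i) is PySem.Chars.findFrom on the .toList side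
-- (exact Python str.find semantics); each iteration jumps to the next occurrence,
-- so fuel s.length + 1 is enough (i strictly increases, L ≥ 1 after the empty-STR guard).
def pvLoopB (s t : List Char) (L : Nat) : Nat → Nat → Int → Int → Int
  | 0, _, best, run => max best run
  | fuel + 1, i, best, run =>
    let j := PySem.Chars.findFrom s t (i : Int)
    if j = -1 then max best run
    else if (i : Int) < j then pvLoopB s t L fuel (j.toNat + L) (max best run) 1
    else pvLoopB s t L fuel (j.toNat + L) best (run + 1)

def longest_run_count_alt (sequence : String) (STR : String) : Int :=
  if STR.toList.isEmpty then 0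
  else pvLoopB sequence.toList STR.toList STR.toList.length (sequence.toList.length + 1) 0 0 0

-- ===== PRECONDITION & SPEC =====
-- Pre_ excludes only STR = "" with a nonempty sequence: there A's loop never advances i
-- (i += 0 on an empty-pattern match) and Python A diverges; B returns 0 there.
def Pre_longest_run_count (sequence : String) (STR : String) : Prop := STR = "" → sequence = ""
instance (sequence : String) (STR : String) : Decidable (Pre_longest_run_count sequence STR) := by
  unfold Pre_longest_run_count; infer_instance
def pvWitness_longest_run_count : String × String := ("AGATAGATAGAT", "AGAT")

def Spec_longest_run_count (sequence : String) (STR : String) (out : Int) : Prop := out = longest_run_count_alt sequence STR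
instance (sequence : String) (STR : String) (out : Int) : Decidable (Spec_longest_run_count sequence STR out) := by unfold Spec_longest_run_count; infer_instance

-- ===== CLAIM (what is proved, stated in full; the proofs are below) =====
def Claim_equal_longest_run_count : Prop := ∀ (sequence : String) (STR : String), Dom_longest_run_count sequence STR → Pre_longest_run_count sequence STR → Spec_longest_run_count sequence STR (longest_run_count sequence STR)

-- ===== LEMMAS AND PROOFS =====

-- the slice test of A is exactly "t is a prefix of s.drop i"
theorem pv_slice_eq_iff (s t : List Char) (i : Nat) :
    (PySem.List.slice s (some (i : Int)) (some ((i : Int) + (t.length : Int))) = t)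
      ↔ t <+: s.drop i := by
  have h : ((i : Int) + (t.length : Int)) = ((i + t.length : Nat) : Int) := by push_cast; ring
  rw [h, PySem.List.slice_natCast]
  have h2 : i + t.length - i = t.length := by omega
  rw [h2]
  constructor
  · intro he; rw [List.prefix_iff_eq_take]; exact he.symm
  · intro hp; exact (List.prefix_iff_eq_take.mp hp).symm

theorem pv_match_bound (s t : List Char) (hL : t ≠ []) (i : Nat) (h : t <+: List.drop i s) :
    i + t.length ≤ s.length := by
  have hlen := h.length_le
  rw [List.length_drop] at hlen
  have : i < s.length := by
    by_contra hc
    have : List.drop i s = [] := List.drop_eq_nil_of_le (by omega)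
    rw [this, List.prefix_nil] at h
    exact hL h
  omega

-- bundled facts about a successful find
theorem pv_find_facts (s t : List Char) (hL : t ≠ []) (i : Nat) (hi : i ≤ s.length)
    (hne : PySem.Chars.findFrom s t (i : Int) ≠ -1) :
    (i : Int) ≤ PySem.Chars.findFrom s t (i : Int) ∧
    i ≤ (PySem.Chars.findFrom s t (i : Int)).toNat ∧
    t <+: List.drop (PySem.Chars.findFrom s t (i : Int)).toNat s ∧
    (PySem.Chars.findFrom s t (i : Int)).toNat + t.length ≤ s.length ∧
    (∀ p, i ≤ p → p < (PySem.Chars.findFrom s t (i : Int)).toNat → ¬ t <+: List.drop p s) := by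
  obtain ⟨h1, h2, h3⟩ := PySem.Chars.findFrom_natCast_spec s t i hi hne
  exact ⟨h1, by omega, h2, pv_match_bound s t hL _ h2, h3⟩

-- single-step unfolding lemmas for the two loops
theorem pv_stepA_miss (s t : List Char) (L : Nat) (f i : Nat) (b r : Int)
    (hi : i < s.length)
    (hm : ¬ PySem.List.slice s (some (i : Int)) (some ((i : Int) + (L : Int))) = t) :
    pvLoopA s t L (f + 1) i b r = pvLoopA s t L f (i + 1) (max b r) 0 := by
  simp only [pvLoopA, if_pos hi, if_neg hm]

theorem pv_stepA_hit (s t : List Char) (L : Nat) (f i : Nat) (b r : Int)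
    (hi : i < s.length)
    (hm : PySem.List.slice s (some (i : Int)) (some ((i : Int) + (L : Int))) = t) :
    pvLoopA s t L (f + 1) i b r = pvLoopA s t L f (i + L) b (r + 1) := by
  simp only [pvLoopA, if_pos hi, if_pos hm]

theorem pv_stepB_none (s t : List Char) (L : Nat) (f i : Nat) (b r : Int)
    (hj : PySem.Chars.findFrom s t (i : Int) = -1) :
    pvLoopB s t L (f + 1) i b r = max b r := by
  simp [pvLoopB, hj]

theorem pv_stepB_far (s t : List Char) (L : Nat) (f i : Nat) (b r : Int)
    (hj : PySem.Chars.findFrom s t (i : Int) ≠ -1)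
    (hlt : (i : Int) < PySem.Chars.findFrom s t (i : Int)) :
    pvLoopB s t L (f + 1) i b r
      = pvLoopB s t L f ((PySem.Chars.findFrom s t (i : Int)).toNat + L) (max b r) 1 := by
  simp only [pvLoopB, if_neg hj, if_pos hlt]

theorem pv_stepB_here (s t : List Char) (L : Nat) (f i : Nat) (b r : Int)
    (hj : PySem.Chars.findFrom s t (i : Int) ≠ -1)
    (hlt : ¬ (i : Int) < PySem.Chars.findFrom s t (i : Int)) :
    pvLoopB s t L (f + 1) i b r
      = pvLoopB s t L f ((PySem.Chars.findFrom s t (i : Int)).toNat + L) b (r + 1) := by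
  simp only [pvLoopB, if_neg hj, if_neg hlt]

theorem pv_loopA_done (s t : List Char) (L : Nat) (i : Nat) (b r : Int) (h : s.length ≤ i) :
    ∀ f, pvLoopA s t L f i b r = max b r := by
  intro f; cases f with
  | zero => rfl
  | succ k => simp [pvLoopA, Nat.not_lt.mpr h]

theorem pv_loopB_done (s t : List Char) (hL : t ≠ []) (L : Nat) (b r : Int)
    (i : Nat) (hi : i ≤ s.length) (h : s.length ≤ i) :
    ∀ f, pvLoopB s t L f i b r = max b r := by
  have hieq : i = s.length := le_antisymm hi h
  subst hieq
  have hfind : PySem.Chars.findFrom s t (s.length : Int) = -1 := by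
    rw [PySem.Chars.findFrom_natCast_eq_neg_one_iff s t s.length le_rfl]
    simp [List.drop_length]
    intro hinf
    exact hL hinf
  intro f; cases f with
  | zero => rfl
  | succ k => exact pv_stepB_none s t L k s.length b r hfind

theorem pv_loopA_fuel (s t : List Char) (hL : t ≠ []) :
    ∀ f f' i b r, s.length - i ≤ f → s.length - i ≤ f' →
      pvLoopA s t t.length f i b r = pvLoopA s t t.length f' i b r := by
  intro f
  induction f with
  | zero =>
    intro f' i b r hf hf'
    rw [pv_loopA_done s t _ i b r (by omega) 0, pv_loopA_done s t _ i b r (by omega) f']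
  | succ k ih =>
    intro f' i b r hf hf'
    by_cases hi : i < s.length
    · have hLpos : 0 < t.length := List.length_pos_of_ne_nil hL
      obtain ⟨k', rfl⟩ : ∃ k', f' = k' + 1 := ⟨f' - 1, by omega⟩
      by_cases hm : PySem.List.slice s (some (i : Int)) (some ((i : Int) + (t.length : Int))) = t
      · rw [pv_stepA_hit s t _ k i b r hi hm, pv_stepA_hit s t _ k' i b r hi hm]
        exact ih k' (i + t.length) b (r + 1) (by omega) (by omega)
      · rw [pv_stepA_miss s t _ k i b r hi hm, pv_stepA_miss s t _ k' i b r hi hm]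
        exact ih k' (i + 1) (max b r) 0 (by omega) (by omega)
    · rw [pv_loopA_done s t _ i b r (by omega) (k + 1), pv_loopA_done s t _ i b r (by omega) f']

theorem pv_loopB_fuel (s t : List Char) (hL : t ≠ []) :
    ∀ f f' i b r, i ≤ s.length → s.length - i ≤ f → s.length - i ≤ f' →
      pvLoopB s t t.length f i b r = pvLoopB s t t.length f' i b r := by
  intro f
  induction f with
  | zero =>
    intro f' i b r hi hf hf'
    rw [pv_loopB_done s t hL _ b r i hi (by omega) 0, pv_loopB_done s t hL _ b r i hi (by omega) f']
  | succ k ih =>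
    intro f' i b r hi hf hf'
    by_cases hj : PySem.Chars.findFrom s t (i : Int) = -1
    · cases f' with
      | zero =>
        rw [pv_loopB_done s t hL _ b r i hi (by omega) (k + 1)]; rfl
      | succ k' => rw [pv_stepB_none s t _ k i b r hj, pv_stepB_none s t _ k' i b r hj]
    · obtain ⟨_, hji, hpre, hbnd, _⟩ := pv_find_facts s t hL i hi hj
      have hLpos : 0 < t.length := List.length_pos_of_ne_nil hL
      obtain ⟨k', rfl⟩ : ∃ k', f' = k' + 1 := ⟨f' - 1, by omega⟩
      by_cases hlt : (i : Int) < PySem.Chars.findFrom s t (i : Int)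
      · rw [pv_stepB_far s t _ k i b r hj hlt, pv_stepB_far s t _ k' i b r hj hlt]
        exact ih k' _ (max b r) 1 (by omega) (by omega) (by omega)
      · rw [pv_stepB_here s t _ k i b r hj hlt, pv_stepB_here s t _ k' i b r hj hlt]
        exact ih k' _ b (r + 1) (by omega) (by omega) (by omega)

-- A over a region with no occurrence at all: returns max b r
theorem pv_loopA_none (s t : List Char) (_hL : t ≠ []) :
    ∀ f i b r, 0 ≤ b → (∀ p, i ≤ p → ¬ t <+: List.drop p s) →
      pvLoopA s t t.length f i b r = max b r := by
  intro f
  induction f with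
  | zero => intro i b r _ _; rfl
  | succ k ih =>
    intro i b r hb hno
    by_cases hi : i < s.length
    · have hm : ¬ PySem.List.slice s (some (i : Int)) (some ((i : Int) + (t.length : Int))) = t := by
        rw [pv_slice_eq_iff]; exact hno i le_rfl
      rw [pv_stepA_miss s t _ k i b r hi hm]
      rw [ih (i + 1) (max b r) 0 (le_trans hb (le_max_left _ _)) (fun p hp => hno p (by omega))]
      rw [max_eq_left (le_trans hb (le_max_left _ _))]
    · exact pv_loopA_done s t _ i b r (by omega) (k + 1)

-- A over a mismatch stretch with run already 0: state is preserved, i advances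
theorem pv_loopA_skip (s t : List Char) (_hL : t ≠ []) :
    ∀ m i b, 0 ≤ b → i + m ≤ s.length →
      (∀ p, i ≤ p → p < i + m → ¬ t <+: List.drop p s) →
      pvLoopA s t t.length (s.length - i + 1) i b 0
        = pvLoopA s t t.length (s.length - (i + m) + 1) (i + m) b 0 := by
  intro m
  induction m with
  | zero => intro i b _ _ _; rfl
  | succ m ih =>
    intro i b hb hbnd hno
    have hi : i < s.length := by omega
    have hm : ¬ PySem.List.slice s (some (i : Int)) (some ((i : Int) + (t.length : Int))) = t := by
      rw [pv_slice_eq_iff]; exact hno i le_rfl (by omega)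
    have hfuel : s.length - i + 1 = (s.length - (i + 1) + 1) + 1 := by omega
    rw [hfuel, pv_stepA_miss s t _ _ i b 0 hi hm, max_eq_left hb]
    rw [ih (i + 1) b hb (by omega) (fun p hp hp' => hno p (by omega) (by omega))]
    have heq : i + 1 + m = i + (m + 1) := by omega
    rw [heq]

-- prefix at p ≥ i gives an infix of s.drop i
theorem pv_infix_of_prefix_drop (s t : List Char) (i p : Nat) (hp : i ≤ p)
    (h : t <+: List.drop p s) : t <:+: List.drop i s := by
  have : List.drop p s = List.drop (p - i) (List.drop i s) := by
    rw [List.drop_drop]; congr 1; omega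
  rw [this] at h
  exact h.isInfix.trans (List.drop_suffix _ _).isInfix

-- the central lemma: A's per-index scan equals B's occurrence-jumping scan
theorem pv_main (s t : List Char) (hL : t ≠ []) :
    ∀ d i b r, s.length - i ≤ d → i ≤ s.length → 0 ≤ b →
      pvLoopA s t t.length (s.length - i + 1) i b r
        = pvLoopB s t t.length (s.length - i + 1) i b r := by
  intro d
  induction d with
  | zero =>
    intro i b r hd hi hb
    rw [pv_loopA_done s t _ i b r (by omega), pv_loopB_done s t hL _ b r i hi (by omega)]
  | succ d ih =>
    intro i b r hd hi hb
    have hLpos : 0 < t.length := List.length_pos_of_ne_nil hL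
    by_cases hj : PySem.Chars.findFrom s t (i : Int) = -1
    · -- no occurrence from i on: A scans to the end, B stops at once
      have hno : ∀ p, i ≤ p → ¬ t <+: List.drop p s := by
        intro p hp hpre
        have hinf := pv_infix_of_prefix_drop s t i p hp hpre
        rw [PySem.Chars.findFrom_natCast_eq_neg_one_iff s t i hi] at hj
        exact hj hinf
      rw [pv_loopA_none s t hL _ i b r hb hno, pv_stepB_none s t _ _ i b r hj]
    · obtain ⟨hjge, hji, hpre, hbnd, hmin⟩ := pv_find_facts s t hL i hi hj
      have hilt : i < s.length := by omega
      by_cases hlt : (i : Int) < PySem.Chars.findFrom s t (i : Int)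
      · -- first occurrence strictly after i: A does one mismatch step, skips, then matches
        have hjngt : i < (PySem.Chars.findFrom s t (i : Int)).toNat := by omega
        have hm : ¬ PySem.List.slice s (some (i : Int)) (some ((i : Int) + (t.length : Int))) = t := by
          rw [pv_slice_eq_iff]; exact hmin i le_rfl hjngt
        have hfuel : s.length - i + 1 = (s.length - (i + 1) + 1) + 1 := by omega
        rw [hfuel, pv_stepA_miss s t _ _ i b r hilt hm,
            pv_stepB_far s t _ _ i b r hj hlt]
        rw [pv_loopA_skip s t hL ((PySem.Chars.findFrom s t (i : Int)).toNat - (i + 1)) (i + 1)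
              (max b r) (le_trans hb (le_max_left _ _)) (by omega)
              (fun p hp hp' => hmin p (by omega) (by omega))]
        have hjeq : i + 1 + ((PySem.Chars.findFrom s t (i : Int)).toNat - (i + 1))
            = (PySem.Chars.findFrom s t (i : Int)).toNat := by omega
        rw [hjeq]
        have hjlt : (PySem.Chars.findFrom s t (i : Int)).toNat < s.length := by omega
        have hmj : PySem.List.slice s (some ((PySem.Chars.findFrom s t (i : Int)).toNat : Int))
            (some (((PySem.Chars.findFrom s t (i : Int)).toNat : Int) + (t.length : Int))) = t := by
          rw [pv_slice_eq_iff]; exact hpre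
        have hfj : s.length - (PySem.Chars.findFrom s t (i : Int)).toNat + 1
            = (s.length - (PySem.Chars.findFrom s t (i : Int)).toNat) + 1 := rfl
        rw [hfj, pv_stepA_hit s t _ _ _ (max b r) 0 hjlt hmj]
        rw [pv_loopA_fuel s t hL _ (s.length - ((PySem.Chars.findFrom s t (i : Int)).toNat + t.length) + 1)
              _ (max b r) (0 + 1) (by omega) (by omega)]
        have h01 : (0 : Int) + 1 = 1 := by norm_num
        rw [h01]
        rw [ih ((PySem.Chars.findFrom s t (i : Int)).toNat + t.length) (max b r) 1
              (by omega) (by omega) (le_trans hb (le_max_left _ _))]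
        exact pv_loopB_fuel s t hL _ (s.length - (i + 1) + 1)
          _ (max b r) 1 (by omega) (by omega) (by omega)
      · -- occurrence exactly at i: both loops extend the current run
        have hjeqi : (PySem.Chars.findFrom s t (i : Int)).toNat = i := by omega
        have hmi : PySem.List.slice s (some (i : Int)) (some ((i : Int) + (t.length : Int))) = t := by
          rw [pv_slice_eq_iff]; rw [hjeqi] at hpre; exact hpre
        have hfuel : s.length - i + 1 = (s.length - i) + 1 := rfl
        rw [hfuel, pv_stepA_hit s t _ _ i b r hilt hmi,
            pv_stepB_here s t _ _ i b r hj hlt, hjeqi]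
        rw [pv_loopA_fuel s t hL _ (s.length - (i + t.length) + 1)
              _ b (r + 1) (by omega) (by omega)]
        rw [ih (i + t.length) b (r + 1) (by omega) (by omega) hb]
        exact pv_loopB_fuel s t hL _ (s.length - i)
          _ b (r + 1) (by omega) (by omega) (by omega)

-- ===== VERDICT (by name: the statement is the Claim_ definition above) =====
theorem longest_run_count_spec : Claim_equal_longest_run_count := by
  intro sequence STR _ hpre
  unfold Spec_longest_run_count longest_run_count longest_run_count_alt
  by_cases hE : STR.toList = []
  · have hS : STR = "" := String.toList_eq_nil_iff.mp hE
    have hseq : sequence = "" := hpre hS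
    subst hS; subst hseq; decide
  · rw [if_neg (by simp [List.isEmpty_iff, hE])]
    have h := pv_main sequence.toList STR.toList hE sequence.toList.length 0 0 0
      (by omega) (by omega) le_rfl
    simpa using h
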